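-- pv_equiv track=rewrite | github.com/emptyenemy/optifine_manager | modules/changelog.py | _extract_single_version_changelog
-- ===== SOURCE A (Python) =====
-- def _extract_single_version_changelog(lines: list[str]) -> list[str]:
--     selected_lines = []
--     seen_header = False
--
--     for line in lines:
--         if line.startswith("OptiFine "):
--             if seen_header:
--                 break
--             seen_header = True
--
--         if seen_header:
--             selected_lines.append(line)
--
--     while selected_lines and not selected_lines[-1].strip():
--         selected_lines.pop()
--
--     return selected_lines or lines
-- ===== SOURCE B (Python) =====
-- def _extract_single_version_changelog(lines: list[str]) -> list[str]:
--     n = len(lines)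
--     # find the first header line
--     i = 0
--     while i < n and not lines[i].startswith("OptiFine "):
--         i += 1
--     if i == n:
--         return lines
--     # find the next header line (end of the block)
--     j = i + 1
--     while j < n and not lines[j].startswith("OptiFine "):
--         j += 1
--     # drop trailing blank lines of the block
--     while j > i and not lines[j - 1].strip():
--         j -= 1
--     return lines[i:j]
-- ===== Notes on version B (the rewrite author's own statement) =====
-- stated objective: simpler
-- what changed: Replaces A's flag-driven accumulation loop (seen_header state, append per line, then pop-trailing-blanks on the collected list, with an 'or lines' fallback) by index arithmetic: find the first header index, find the next header index, decrement the end index past trailing blank lines, and return a single slice.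
import Mathlib
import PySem

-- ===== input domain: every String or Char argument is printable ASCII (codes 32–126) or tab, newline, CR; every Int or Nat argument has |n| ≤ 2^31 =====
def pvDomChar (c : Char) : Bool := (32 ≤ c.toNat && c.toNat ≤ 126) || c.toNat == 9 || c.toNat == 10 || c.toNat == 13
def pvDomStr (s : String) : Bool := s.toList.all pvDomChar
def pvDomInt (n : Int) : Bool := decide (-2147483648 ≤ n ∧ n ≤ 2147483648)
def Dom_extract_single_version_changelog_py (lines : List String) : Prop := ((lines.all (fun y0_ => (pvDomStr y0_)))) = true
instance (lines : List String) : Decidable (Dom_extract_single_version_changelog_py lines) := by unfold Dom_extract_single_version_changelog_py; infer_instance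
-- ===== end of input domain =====

-- B replaces A's flag-driven accumulation loop by index search: find the first
-- header, the next header, trim trailing blanks by decrementing the end index,
-- and return one slice (objective: simpler decomposition, same cost).

-- ===== PORT A =====
-- the for-loop of A: state = (selected_lines, seen_header); 'break' returns sel
def pvA_loop : List String → List String → Bool → List String
  | [], sel, _ => sel
  | line :: rest, sel, seen =>
    if PySem.Str.startswith line "OptiFine " && seen then sel  -- break
    else
      let seen' := seen || PySem.Str.startswith line "OptiFine "
      if seen' then pvA_loop rest (sel ++ [line]) seen'
      else pvA_loop rest sel seen'

-- the while-pop loop: drop the last line while it strips to empty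
def pvA_trim (xs : List String) : List String :=
  if h : !xs.isEmpty && (PySem.Str.strip (xs.getLastD "") == "") then pvA_trim xs.dropLast
  else xs
termination_by xs.length
decreasing_by
  have : xs ≠ [] := by simp at h; intro hn; simp [hn] at h
  simpa [List.length_dropLast] using Nat.sub_lt (List.length_pos_of_ne_nil this) one_pos

def extract_single_version_changelog_py (lines : List String) : List String :=
  let sel := pvA_trim (pvA_loop lines [] false)
  if sel.isEmpty then lines else sel   -- 'selected_lines or lines'

-- ===== PORT B =====
-- 'while i < n and not lines[i].startswith("OptiFine "): i += 1'
def pvB_scan (lines : List String) (i : Nat) : Nat :=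
  if h : i < lines.length then
    if PySem.Str.startswith lines[i] "OptiFine " then i else pvB_scan lines (i + 1)
  else i
termination_by lines.length - i

-- 'while j > i and not lines[j-1].strip(): j -= 1'
def pvB_trim (lines : List String) (i j : Nat) : Nat :=
  if h : i < j ∧ PySem.Str.strip (lines.getD (j - 1) "") == "" then pvB_trim lines i (j - 1)
  else j
termination_by j
decreasing_by omega

def extract_single_version_changelog_py_alt (lines : List String) : List String :=
  let n := lines.length
  let i := pvB_scan lines 0
  if i == n then lines
  else
    let j := pvB_trim lines i (pvB_scan lines (i + 1))
    PySem.List.slice lines (some (i : Int)) (some (j : Int))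

-- ===== PRECONDITION & SPEC =====
def Spec_extract_single_version_changelog_py (lines : List String) (out : List String) : Prop := out = extract_single_version_changelog_py_alt lines
instance (lines : List String) (out : List String) : Decidable (Spec_extract_single_version_changelog_py lines out) := by unfold Spec_extract_single_version_changelog_py; infer_instance

-- ===== CLAIM (what is proved, stated in full; the proofs are below) =====
def Claim_equal_extract_single_version_changelog_py : Prop := ∀ (lines : List String), Dom_extract_single_version_changelog_py lines → Spec_extract_single_version_changelog_py lines (extract_single_version_changelog_py lines)

-- ===== LEMMAS AND PROOFS =====

-- abbreviations used only by the proofs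
def pvHdr (l : String) : Bool := PySem.Str.startswith l "OptiFine "
def pvNotHdr (l : String) : Bool := !pvHdr l
def pvBlank (l : String) : Bool := PySem.Str.strip l == ""
def pvRTrim (xs : List String) : List String := (xs.reverse.dropWhile pvBlank).reverse

lemma pvA_loop_seen (rest sel : List String) :
    pvA_loop rest sel true = sel ++ rest.takeWhile pvNotHdr := by
  induction rest generalizing sel with
  | nil => simp [pvA_loop]
  | cons l t ih =>
    by_cases h : pvHdr l
    · simp [pvA_loop, pvHdr] at h ⊢; simp [h, List.takeWhile_cons, pvNotHdr, pvHdr]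
    · simp [pvHdr] at h
      simp [pvA_loop, h, ih, List.takeWhile_cons, pvNotHdr, pvHdr]

lemma pvA_loop_start (ls : List String) :
    pvA_loop ls [] false =
      match ls.dropWhile pvNotHdr with
      | [] => []
      | h :: t => h :: t.takeWhile pvNotHdr := by
  induction ls with
  | nil => simp [pvA_loop]
  | cons l t ih =>
    by_cases h : pvHdr l
    · simp [pvHdr] at h
      simp [pvA_loop, h, pvA_loop_seen, List.dropWhile_cons, pvNotHdr, pvHdr]
    · simp [pvHdr] at h
      simp [pvA_loop, h, ih, List.dropWhile_cons, pvNotHdr, pvHdr]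

lemma pvA_trim_eq (xs : List String) : pvA_trim xs = pvRTrim xs := by
  induction xs using List.reverseRecOn with
  | nil => simp [pvA_trim, pvRTrim]
  | append_singleton ys x ih =>
    rw [pvA_trim]
    by_cases hb : pvBlank x
    · simp [pvBlank] at hb
      simp [hb, ih, pvRTrim, List.dropWhile_cons, pvBlank]
    · simp [pvBlank] at hb
      simp [hb, pvRTrim, List.dropWhile_cons, pvBlank]

lemma pvB_scan_eq (ls : List String) (i : Nat) (hi : i ≤ ls.length) :
    pvB_scan ls i = i + ((ls.drop i).takeWhile pvNotHdr).length := by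
  rcases Nat.lt_or_ge i ls.length with h | h
  · rw [pvB_scan, dif_pos h]
    have hdrop : ls.drop i = ls[i] :: ls.drop (i + 1) := List.drop_eq_getElem_cons h
    rw [hdrop, List.takeWhile_cons]
    by_cases hp : PySem.Str.startswith ls[i] "OptiFine "
    · have hn : pvNotHdr ls[i] = false := by simp only [pvNotHdr, pvHdr, hp, Bool.not_true]
      rw [if_pos hp, hn]
      simp
    · have hp' : PySem.Str.startswith ls[i] "OptiFine " = false := Bool.eq_false_iff.mpr hp
      have hn : pvNotHdr ls[i] = true := by simp only [pvNotHdr, pvHdr, hp', Bool.not_false]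
      rw [if_neg hp, pvB_scan_eq ls (i + 1) h, hn]
      simp; omega
  · have he : i = ls.length := le_antisymm hi h
    rw [pvB_scan]
    simp [he]
termination_by ls.length - i

lemma pvHdr_not_blank (l : String) (h : pvHdr l = true) : pvBlank l = false := by
  have hpre : "OptiFine ".toList <+: l.toList := by
    simp only [pvHdr, PySem.Str.startswith_eq] at h
    exact (PySem.Chars.startswith_iff _ _).mp h
  obtain ⟨t, ht⟩ := hpre
  rw [Bool.eq_false_iff]
  intro hb
  have hb' : PySem.Str.strip l = "" := by simpa [pvBlank] using hb
  have h0 : PySem.Chars.strip l.toList = [] := by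
    have := congrArg String.toList hb'
    simpa [PySem.Str.toList_strip] using this
  have h1 : List.dropWhile PySem.Chars.isspace
      ((List.dropWhile PySem.Chars.isspace l.toList).reverse) = [] := by
    simpa [PySem.Chars.strip, PySem.Chars.rstrip, PySem.Chars.lstrip] using h0
  have hO : 'O' ∈ List.dropWhile PySem.Chars.isspace l.toList := by
    have hl : l.toList = 'O' :: ("ptiFine ".toList ++ t) := by rw [← ht]; rfl
    rw [hl, List.dropWhile_cons]
    have hsp : PySem.Chars.isspace 'O' = false := by decide
    simp [hsp]
  have := List.dropWhile_eq_nil_iff.mp h1 'O' (List.mem_reverse.mpr hO)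
  exact absurd this (by decide)

lemma pvRTrim_append_blank (xs : List String) (x : String) (hx : pvBlank x = true) :
    pvRTrim (xs ++ [x]) = pvRTrim xs := by
  simp [pvRTrim, List.dropWhile_cons, hx]

lemma pvRTrim_append_keep (xs : List String) (x : String) (hx : pvBlank x = false) :
    pvRTrim (xs ++ [x]) = xs ++ [x] := by
  simp [pvRTrim, List.dropWhile_cons, hx]

lemma pvRTrim_ne_nil (h : String) (w : List String) (hh : pvBlank h = false) :
    pvRTrim (h :: w) ≠ [] := by
  intro hc
  have : List.dropWhile pvBlank (h :: w).reverse = [] := by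
    simpa [pvRTrim] using congrArg List.reverse hc
  have := List.dropWhile_eq_nil_iff.mp this h (by simp)
  rw [hh] at this; exact Bool.false_ne_true this

lemma pvB_trim_eq (ls : List String) (i : Nat) (hI : i < ls.length)
    (hB : pvBlank ls[i] = false) (j : Nat) (hij : i < j) (hj : j ≤ ls.length) :
    (ls.drop i).take (pvB_trim ls i j - i) = pvRTrim ((ls.drop i).take (j - i)) := by
  have hj1 : j - 1 < ls.length := by omega
  have hgd : ls.getD (j - 1) "" = ls[j - 1] := List.getD_eq_getElem ls "" hj1
  have hsplit : ∀ k (hik : i < k) (hkj : k ≤ j), (ls.drop i).take (k - i) = (ls.drop i).take (k - 1 - i) ++ [ls[k-1]'(by omega)] := by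
    intro k hik hkj
    have h1 : k - i = (k - 1 - i) + 1 := by omega
    rw [h1, List.take_succ]
    have h2 : (ls.drop i)[k-1-i]? = some (ls[k-1]'(by omega)) := by
      rw [List.getElem?_drop]
      have h3 : i + (k - 1 - i) = k - 1 := by omega
      rw [h3, List.getElem?_eq_getElem (by omega)]
    rw [h2]; rfl
  rw [pvB_trim]
  by_cases hc : i < j ∧ (PySem.Str.strip (ls.getD (j - 1) "") == "") = true
  · rw [dif_pos hc]
    have hbl : pvBlank ls[j-1] = true := by rw [pvBlank, ← hgd]; exact hc.2
    have hne : i ≠ j - 1 := by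
      intro he
      have h9 : ls[i]? = ls[j-1]? := by rw [he]
      rw [List.getElem?_eq_getElem hI, List.getElem?_eq_getElem hj1] at h9
      have h10 : ls[i] = ls[j-1] := Option.some.inj h9
      rw [← h10, hB] at hbl; exact Bool.false_ne_true hbl
    have hlt : i < j - 1 := by omega
    have IH := pvB_trim_eq ls i hI hB (j - 1) hlt (by omega)
    rw [IH, hsplit j hij le_rfl, pvRTrim_append_blank _ _ hbl]
  · rw [dif_neg hc]
    have hnb : pvBlank ls[j-1] = false := by
      rw [pvBlank, ← hgd]
      rcases Bool.eq_false_or_eq_true (PySem.Str.strip (ls.getD (j - 1) "") == "") with h | h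
      · exact absurd ⟨hij, h⟩ hc
      · exact h
    rw [hsplit j hij le_rfl, pvRTrim_append_keep _ _ hnb, ← hsplit j hij le_rfl]
termination_by j

-- ===== VERDICT (by name: the statement is the Claim_ definition above) =====
theorem extract_single_version_changelog_py_spec : Claim_equal_extract_single_version_changelog_py := by
  intro ls _dom
  unfold Spec_extract_single_version_changelog_py
  unfold extract_single_version_changelog_py extract_single_version_changelog_py_alt
  cases hd : ls.dropWhile pvNotHdr with
  | nil =>
    have htw : ls.takeWhile pvNotHdr = ls := by
      have := List.takeWhile_append_dropWhile (p := pvNotHdr) (l := ls)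
      rw [hd] at this; simpa using this
    have hscan : pvB_scan ls 0 = ls.length := by
      rw [pvB_scan_eq ls 0 (Nat.zero_le _)]
      simp [htw]
    rw [pvA_loop_start, hd, hscan]
    simp [pvA_trim]
  | cons h t =>
    have hls : ls = ls.takeWhile pvNotHdr ++ h :: t := by
      rw [← hd]; exact (List.takeWhile_append_dropWhile (p := pvNotHdr) (l := ls)).symm
    have hlen : ls.length = (ls.takeWhile pvNotHdr).length + (t.length + 1) := by
      conv_lhs => rw [hls]
      simp
    have hi0 : (ls.takeWhile pvNotHdr).length < ls.length := by omega
    have hdrop : ls.drop (ls.takeWhile pvNotHdr).length = h :: t := by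
      have h8 := List.drop_left (l₁ := ls.takeWhile pvNotHdr) (l₂ := h :: t)
      rw [← hls] at h8
      exact h8
    have hget : ls[(ls.takeWhile pvNotHdr).length]'hi0 = h := by
      have h9 : ls[(ls.takeWhile pvNotHdr).length]? = some h := by
        have := congrArg List.head? hdrop
        rwa [List.head?_drop] at this
      rw [List.getElem?_eq_getElem hi0] at h9
      exact Option.some.inj h9
    have hh : pvHdr h = true := by
      have := List.head?_dropWhile_not pvNotHdr ls
      rw [hd] at this
      simp only [List.head?_cons] at this
      simpa [pvNotHdr] using this
    have hscan0 : pvB_scan ls 0 = (ls.takeWhile pvNotHdr).length := by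
      rw [pvB_scan_eq ls 0 (Nat.zero_le _)]
      simp
    have hdrop1 : ls.drop ((ls.takeWhile pvNotHdr).length + 1) = t := by
      have : ls.drop ((ls.takeWhile pvNotHdr).length + 1) =
          (ls.drop (ls.takeWhile pvNotHdr).length).drop 1 := by
        rw [List.drop_drop]
      rw [this, hdrop]
      rfl
    have hscan1 : pvB_scan ls ((ls.takeWhile pvNotHdr).length + 1) =
        (ls.takeWhile pvNotHdr).length + 1 + (t.takeWhile pvNotHdr).length := by
      rw [pvB_scan_eq ls _ (by omega), hdrop1]
    have htwle : (t.takeWhile pvNotHdr).length ≤ t.length :=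
      (List.takeWhile_prefix _).length_le
    have hBnb : pvBlank (ls[(ls.takeWhile pvNotHdr).length]'hi0) = false := by
      rw [hget]; exact pvHdr_not_blank h hh
    have htrim := pvB_trim_eq ls (ls.takeWhile pvNotHdr).length hi0 hBnb
      ((ls.takeWhile pvNotHdr).length + 1 + (t.takeWhile pvNotHdr).length)
      (by omega) (by omega)
    have hblock : (ls.drop (ls.takeWhile pvNotHdr).length).take
        ((ls.takeWhile pvNotHdr).length + 1 + (t.takeWhile pvNotHdr).length
          - (ls.takeWhile pvNotHdr).length) = h :: t.takeWhile pvNotHdr := by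
      rw [hdrop]
      have h1 : (ls.takeWhile pvNotHdr).length + 1 + (t.takeWhile pvNotHdr).length
          - (ls.takeWhile pvNotHdr).length = (t.takeWhile pvNotHdr).length + 1 := by omega
      rw [h1, List.take_succ_cons]
      congr 1
      exact (List.prefix_iff_eq_take.mp (List.takeWhile_prefix _)).symm
    have hne : ((ls.takeWhile pvNotHdr).length == ls.length) = false := by
      simp; omega
    have hnonempty : (pvRTrim (h :: t.takeWhile pvNotHdr)).isEmpty = false := by
      rw [List.isEmpty_eq_false_iff]
      exact pvRTrim_ne_nil h _ (pvHdr_not_blank h hh)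
    rw [pvA_loop_start, hd, pvA_trim_eq]
    simp only [hscan0, hscan1, hne, Bool.false_eq_true, if_false, hnonempty]
    rw [PySem.List.slice_natCast, htrim, hblock]
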